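-- pv_equiv track=rewrite | github.com/GpNico/cooccurrences | src/utils.py | convert_bigrams_to_ids
-- ===== SOURCE A (Python) =====
-- def convert_bigrams_to_ids(bigrams):
--     """
--         Take a list of bigrams and returns a list of bigrams ids.
--             ex:
--                 [('a', 'b'), ('a','c'), ('b','d')] => [(0,1),(0,2),(1,3)]
--     """
--     token_to_id = {}
--     id = 0
--     new_list = []
--     for w1, w2 in bigrams:
--         if w1 in token_to_id.keys():
--             id1 = token_to_id[w1]
--         else:
--             id1 = id
--             token_to_id[w1] = id
--             id += 1
--
--         if w2 in token_to_id.keys():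
--             id2 = token_to_id[w2]
--         else:
--             id2 = id
--             token_to_id[w2] = id
--             id += 1
--         new_list.append((id1, id2))
--     return new_list
-- ===== SOURCE B (Python) =====
-- def convert_bigrams_to_ids(bigrams):
--     """Closed-form: a token's id equals the number of distinct tokens that occur
--     strictly before its first occurrence in the flattened token stream."""
--     bigrams = list(bigrams)  # stay safe on iterator inputs
--     flat = [t for pair in bigrams for t in pair]
--
--     def token_id(t):
--         return len(set(flat[:flat.index(t)]))
--
--     return [(token_id(w1), token_id(w2)) for w1, w2 in bigrams]
-- ===== Notes on version B (the rewrite author's own statement) =====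
-- stated objective: alternative
-- what changed: B drops A's stateful loop (incremental id counter + dict built alongside the output) for a closed-form definition: each token's id is the number of distinct tokens strictly before its first occurrence in the flattened token stream, computed per bigram with index/slice/set; this trades A's O(n) single pass for an O(n^2) but stateless formulation.
import Mathlib
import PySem

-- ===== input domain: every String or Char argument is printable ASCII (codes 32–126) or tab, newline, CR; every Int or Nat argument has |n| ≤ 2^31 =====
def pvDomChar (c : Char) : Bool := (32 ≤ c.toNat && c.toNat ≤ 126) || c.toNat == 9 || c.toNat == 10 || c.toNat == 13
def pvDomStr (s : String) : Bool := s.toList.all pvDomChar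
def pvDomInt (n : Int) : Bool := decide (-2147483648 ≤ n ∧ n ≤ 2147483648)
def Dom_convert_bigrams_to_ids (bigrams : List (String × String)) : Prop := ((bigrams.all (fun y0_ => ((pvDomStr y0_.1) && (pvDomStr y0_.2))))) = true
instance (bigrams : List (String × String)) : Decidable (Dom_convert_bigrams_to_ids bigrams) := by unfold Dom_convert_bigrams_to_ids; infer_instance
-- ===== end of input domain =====

-- B replaces A's stateful loop (id counter + dict) by a closed-form rule: a token's id is the number of distinct tokens before its first occurrence in the flattened stream (alternative decomposition, not faster).


-- ===== PORT A =====
-- loop body of A: state (token_to_id, id, new_list), one bigram (w1, w2)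
def stepA (st : PySem.Dict String Int × Int × List (Int × Int)) (wp : String × String) :
    PySem.Dict String Int × Int × List (Int × Int) :=
  match st, wp with
  | (d, id, acc), (w1, w2) =>
    match (if d.contains w1 then (d.getD w1 0, d, id) else (id, d.insert w1 id, id + 1)) with
    | (id1, d1, i1) =>
      match (if d1.contains w2 then (d1.getD w2 0, d1, i1) else (i1, d1.insert w2 i1, i1 + 1)) with
      | (id2, d2, i2) => (d2, i2, acc ++ [(id1, id2)])

def convert_bigrams_to_ids (bigrams : List (String × String)) : List (Int × Int) :=
  (bigrams.foldl stepA (PySem.Dict.empty, 0, [])).2.2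

-- ===== PORT B =====
-- token_id(t) = len(set(flat[:flat.index(t)])); index never raises here since t comes from flat
def tokenId (flat : List String) (t : String) : Int :=
  match PySem.List.index? flat t with
  | some i => ((PySem.Set.ofList (PySem.List.slice flat none (some (i : Int)))).length : Int)
  | none => 0   -- unreachable for tokens of flat (Python would raise ValueError)

def convert_bigrams_to_ids_alt (bigrams : List (String × String)) : List (Int × Int) :=
  let flat := bigrams.flatMap (fun p => [p.1, p.2])
  bigrams.map (fun p => (tokenId flat p.1, tokenId flat p.2))

-- ===== PRECONDITION & SPEC =====
def Spec_convert_bigrams_to_ids (bigrams : List (String × String)) (out : List (Int × Int)) : Prop := out = convert_bigrams_to_ids_alt bigrams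
instance (bigrams : List (String × String)) (out : List (Int × Int)) : Decidable (Spec_convert_bigrams_to_ids bigrams out) := by unfold Spec_convert_bigrams_to_ids; infer_instance

-- ===== CLAIM =====
def Claim_equal_convert_bigrams_to_ids : Prop := ∀ (bigrams : List (String × String)), Dom_convert_bigrams_to_ids bigrams → Spec_convert_bigrams_to_ids bigrams (convert_bigrams_to_ids bigrams)

-- ===== LEMMAS AND PROOFS =====

-- number of distinct elements of a list (as Int)
def nd (l : List String) : Int := ((PySem.Set.ofList l).length : Int)

-- A's dict after processing token list p maps exactly the tokens of p to their closed-form ids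
def InvA (p : List String) (d : PySem.Dict String Int) : Prop :=
  ∀ t : String, d.get? t = if t ∈ p then some (tokenId p t) else none

theorem ofList_append_singleton (p : List String) (w : String) :
    PySem.Set.ofList (p ++ [w]) = PySem.Set.add (PySem.Set.ofList p) w := by
  rw [PySem.Set.ofList_eq_foldl, List.foldl_append, ← PySem.Set.ofList_eq_foldl]; rfl

theorem nd_append_singleton (p : List String) (w : String) :
    nd (p ++ [w]) = if w ∈ p then nd p else nd p + 1 := by
  unfold nd
  rw [ofList_append_singleton]
  by_cases h : w ∈ p
  · have hm : w ∈ PySem.Set.ofList p := (PySem.Set.mem_ofList p w).mpr h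
    simp [PySem.Set.add, PySem.Set.contains, hm, h]
  · have hm : w ∉ PySem.Set.ofList p := fun hc => h ((PySem.Set.mem_ofList p w).mp hc)
    simp [PySem.Set.add, PySem.Set.contains, hm, h]

theorem tokenId_prefix (p suf : List String) (t : String) (h : t ∈ p) :
    tokenId (p ++ suf) t = tokenId p t := by
  obtain ⟨i, hi⟩ := Option.isSome_iff_exists.mp ((PySem.List.index?_isSome_iff p t).mpr h)
  obtain ⟨hk, -, -⟩ := PySem.List.getElem_of_index?_eq_some hi
  unfold tokenId
  rw [PySem.List.index?_append_of_mem suf h, hi]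
  simp only [PySem.List.slice_to_natCast, List.take_append_of_le_length (Nat.le_of_lt hk)]

theorem tokenId_append_self (p : List String) (w : String) (h : w ∉ p) :
    tokenId (p ++ [w]) w = nd p := by
  unfold tokenId
  rw [PySem.List.index?_append_singleton_self p w h]
  simp only [PySem.List.slice_to_natCast, List.take_append_of_le_length (Nat.le_refl p.length),
    List.take_length]
  rfl

theorem contains_of_inv (p : List String) (d : PySem.Dict String Int) (hInv : InvA p d) (w : String) :
    d.contains w = decide (w ∈ p) := by
  rw [PySem.Dict.contains_eq_isSome_get?, hInv w]
  by_cases h : w ∈ p <;> simp [h]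

-- one token of A's loop body, done abstractly
theorem tokStep_spec (p : List String) (d : PySem.Dict String Int) (w : String) (hInv : InvA p d) :
    ∃ d' : PySem.Dict String Int,
      (if d.contains w then (d.getD w 0, d, nd p) else (nd p, d.insert w (nd p), nd p + 1))
        = (tokenId (p ++ [w]) w, d', nd (p ++ [w])) ∧ InvA (p ++ [w]) d' := by
  by_cases h : w ∈ p
  · refine ⟨d, ?_, ?_⟩
    · rw [contains_of_inv p d hInv w]
      simp only [h, decide_true, if_true]
      have hg : d.getD w 0 = tokenId p w := by
        rw [PySem.Dict.getD_eq_get?_getD, hInv w]; simp [h]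
      rw [hg, tokenId_prefix p [w] w h, nd_append_singleton]
      simp [h]
    · intro t
      rw [hInv t]
      by_cases ht : t ∈ p
      · simp [List.mem_append, ht, tokenId_prefix p [w] t ht]
      · have h2 : t ∉ p ++ [w] := by
          simp only [List.mem_append, List.mem_singleton]
          rintro (h1 | rfl); exact ht h1; exact ht h
        simp [ht, h2]
  · refine ⟨d.insert w (nd p), ?_, ?_⟩
    · rw [contains_of_inv p d hInv w]
      simp only [h, decide_false, Bool.false_eq_true, if_false]
      rw [tokenId_append_self p w h, nd_append_singleton]
      simp [h]
    · intro t
      by_cases htw : t = w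
      · subst htw
        rw [PySem.Dict.get?_insert_self]
        simp [tokenId_append_self p t h]
      · rw [PySem.Dict.get?_insert_of_ne d _ htw, hInv t]
        by_cases ht : t ∈ p
        · simp [List.mem_append, ht, tokenId_prefix p [w] t ht]
        · have h2 : t ∉ p ++ [w] := by
            simp only [List.mem_append, List.mem_singleton]
            rintro (h1 | rfl); exact ht h1; exact htw rfl
          simp [ht, h2]

def flatten (bs : List (String × String)) : List String := bs.flatMap (fun p => [p.1, p.2])

theorem loop_eq (bs : List (String × String)) (p : List String) (d : PySem.Dict String Int)
    (acc : List (Int × Int)) (hInv : InvA p d) :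
    (bs.foldl stepA (d, nd p, acc)).2.2
      = acc ++ bs.map (fun wp => (tokenId (p ++ flatten bs) wp.1, tokenId (p ++ flatten bs) wp.2)) := by
  induction bs generalizing p d acc with
  | nil => simp [flatten]
  | cons hd rest ih =>
    obtain ⟨w1, w2⟩ := hd
    obtain ⟨d1, hstep1, hInv1⟩ := tokStep_spec p d w1 hInv
    obtain ⟨d2, hstep2, hInv2⟩ := tokStep_spec (p ++ [w1]) d1 w2 hInv1
    have hflat : p ++ flatten ((w1, w2) :: rest) = ((p ++ [w1]) ++ [w2]) ++ flatten rest := by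
      simp [flatten]
    have hstepA : stepA (d, nd p, acc) (w1, w2)
        = (d2, nd ((p ++ [w1]) ++ [w2]),
            acc ++ [(tokenId (p ++ [w1]) w1, tokenId ((p ++ [w1]) ++ [w2]) w2)]) := by
      simp only [stepA, hstep1, hstep2]
    have h1 : tokenId (p ++ flatten ((w1, w2) :: rest)) w1 = tokenId (p ++ [w1]) w1 := by
      rw [hflat, List.append_assoc (p ++ [w1])]
      exact tokenId_prefix (p ++ [w1]) _ w1 (by simp)
    have h2 : tokenId (p ++ flatten ((w1, w2) :: rest)) w2 = tokenId ((p ++ [w1]) ++ [w2]) w2 := by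
      rw [hflat]
      exact tokenId_prefix ((p ++ [w1]) ++ [w2]) _ w2 (by simp)
    calc ((((w1, w2) :: rest)).foldl stepA (d, nd p, acc)).2.2
        = (rest.foldl stepA (d2, nd ((p ++ [w1]) ++ [w2]),
            acc ++ [(tokenId (p ++ [w1]) w1, tokenId ((p ++ [w1]) ++ [w2]) w2)])).2.2 := by
          rw [List.foldl_cons, hstepA]
      _ = _ := by
          rw [ih _ d2 _ hInv2,
            show ((p ++ [w1]) ++ [w2]) ++ flatten rest = p ++ flatten ((w1, w2) :: rest) from hflat.symm]
          simp [h1, h2]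

-- ===== VERDICT =====
theorem convert_bigrams_to_ids_spec : Claim_equal_convert_bigrams_to_ids := by
  intro bigrams _
  show convert_bigrams_to_ids bigrams = convert_bigrams_to_ids_alt bigrams
  unfold convert_bigrams_to_ids convert_bigrams_to_ids_alt
  have hInv0 : InvA [] PySem.Dict.empty := by
    intro t; simp [PySem.Dict.get?_empty]
  have h := loop_eq bigrams [] PySem.Dict.empty [] hInv0
  simp only [nd, PySem.Set.ofList, List.foldl_nil, List.nil_append, flatten] at h
  simpa using h
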